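-- pv_equiv track=rewrite | github.com/ttichy/foobar | solution1.py | solution
-- ===== SOURCE A (Python) =====
-- def check_substring(str, substr):
--     if not str:
--         return True
--     if str[:len(substr)]!=substr:
--         return False
--     return check_substring(str[len(substr):],substr)
--
-- def solution(str):
--     length = len(str)
--     rng = range(1,length-1)
--     for size in rng:
--         # don't bother checking if there is reminder
--         if length % size != 0:
--             continue
--         substr=str[:size]
--
--         if check_substring(str,substr):
--             return int(len(str)/len(substr))
--
--     # worst case there is only one equal part (the whole cake)
--     return 1
-- ===== SOURCE B (Python) =====
-- def solution(str):
--     # Shift-comparison periodicity test: the string tiles into blocks of size d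
--     # iff d divides n and the string equals itself shifted by d.
--     n = len(str)
--     for d in range(1, n + 1):
--         if n % d == 0 and str[d:] == str[:n - d]:
--             return n // d
--     return 1
-- ===== Notes on version B (the rewrite author's own statement) =====
-- stated objective: faster
-- what changed: A tests each candidate block size with a recursive block-by-block prefix-stripping helper over range(1, n-1); B replaces that with a single shift self-comparison str[d:] == str[:n-d] per divisor d of n and scans d up to n, which also covers the block size n/2 that A's range misses for n = 2.
-- intended difference: On length-2 strings with both characters equal (e.g. 'aa') A returns 1 because its range(1, length-1) is empty and never tries block size 1, while B returns the intended 2 (two equal halves). — e.g. on solution("aa"): A returns 1, B returns 2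
import Mathlib
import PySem

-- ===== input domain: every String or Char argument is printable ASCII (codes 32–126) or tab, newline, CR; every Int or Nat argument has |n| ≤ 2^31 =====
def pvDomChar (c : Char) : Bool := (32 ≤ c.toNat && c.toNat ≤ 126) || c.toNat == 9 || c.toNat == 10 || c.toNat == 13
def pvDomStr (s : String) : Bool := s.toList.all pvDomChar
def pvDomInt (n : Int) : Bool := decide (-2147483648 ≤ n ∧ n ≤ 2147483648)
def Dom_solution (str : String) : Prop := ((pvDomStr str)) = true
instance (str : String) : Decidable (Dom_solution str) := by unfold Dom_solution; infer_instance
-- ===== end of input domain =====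

-- B replaces A's recursive block-by-block tiling test with a single shift-comparison
-- (s[d:] == s[:n-d]) per divisor; B also fixes A's missed size n/2 on length-2 strings (see D_).

-- ===== PORT A =====
-- check_substring(str, substr): recursion ported with fuel = |str|+1; every call made by
-- `solution` has substr ≠ [], so the fuel is never exhausted on reachable calls.
-- str[:len(substr)] / str[len(substr):] with a nonnegative Nat bound are take / drop (exact).
def check_substring (fuel : Nat) (s sub : List Char) : Bool :=
  match fuel with
  | 0 => true
  | f + 1 =>
    if s = [] then true
    else if s.take sub.length ≠ sub then false
    else check_substring f (s.drop sub.length) sub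

-- the `for size in rng` loop with early return; int(len(str)/len(substr)) is the exact
-- quotient n / size (size divides n and both are positive at that point).
def solLoopA (s : List Char) (n : Int) : List Int → Int
  | [] => 1
  | size :: rest =>
    if PySem.Int.mod n size ≠ 0 then solLoopA s n rest
    else
      if check_substring (s.length + 1) s (s.take size.toNat) then n / size
      else solLoopA s n rest

def solution (str : String) : Int :=
  let s := str.toList
  let length : Int := s.length
  solLoopA s length (PySem.List.pyRange 1 (length - 1) 1)

-- ===== PORT B =====
-- str[d:] / str[:n-d] with nonnegative bounds are drop / take (exact).
def solLoopB (s : List Char) (n : Int) : List Int → Int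
  | [] => 1
  | d :: rest =>
    if PySem.Int.mod n d = 0 ∧ s.drop d.toNat = s.take (n - d).toNat then
      PySem.Int.floordiv n d
    else solLoopB s n rest

def solution_alt (str : String) : Int :=
  let s := str.toList
  let n : Int := s.length
  solLoopB s n (PySem.List.pyRange 1 (n + 1) 1)

-- ===== PRECONDITION & SPEC =====
-- On length-2 strings with both characters equal A returns 1 (its range(1, length-1) is
-- empty for length 2, so the block size 1 is never tried) while B returns the intended 2.
def D_solution (str : String) : Prop :=
  str.toList.length = 2 ∧ str.toList[0]? = str.toList[1]?
instance (str : String) : Decidable (D_solution str) := by unfold D_solution; infer_instance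

def Spec_solution (str : String) (out : Int) : Prop := ¬ D_solution str → out = solution_alt str
instance (str : String) (out : Int) : Decidable (Spec_solution str out) := by
  unfold Spec_solution; infer_instance

def pvDiffWitness_solution : String := "aa"
def pvDiffWitnessOut_solution : Int × Int := (1, 2)

-- ===== CLAIM (what is proved, stated in full; the proofs are below) =====
def Claim_unchanged_solution : Prop := ∀ (str : String), Dom_solution str → Spec_solution str (solution str)
def Claim_changed_solution : Prop := Dom_solution (pvDiffWitness_solution) ∧ D_solution (pvDiffWitness_solution) ∧ solution (pvDiffWitness_solution) = pvDiffWitnessOut_solution.1 ∧ solution_alt (pvDiffWitness_solution) = pvDiffWitnessOut_solution.2 ∧ pvDiffWitnessOut_solution.1 ≠ pvDiffWitnessOut_solution.2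
def Claim_exact_solution : Prop := ∀ (str : String), Dom_solution str → D_solution str → solution str ≠ solution_alt str

-- ===== LEMMAS AND PROOFS =====

theorem chk_iff (fuel : Nat) (s sub : List Char) (hsub : sub ≠ []) (hf : s.length < fuel) :
    (check_substring fuel s sub = true ↔ ∃ k, s = (List.replicate k sub).flatten) := by
  induction fuel generalizing s with
  | zero => omega
  | succ f ih =>
    by_cases hs : s = []
    · subst hs
      simp [check_substring]
      exact ⟨0, by simp⟩
    · rw [check_substring]
      simp only [if_neg hs]
      by_cases ht : s.take sub.length = sub
      · have hlen : 0 < sub.length := List.length_pos_iff.mpr hsub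
        have hslen : 0 < s.length := List.length_pos_iff.mpr hs
        have hdrop : (s.drop sub.length).length < f := by
          simp [List.length_drop]; omega
        rw [if_neg (by simp [ht])]
        rw [ih (s.drop sub.length) hdrop]
        constructor
        · rintro ⟨k, hk⟩
          refine ⟨k + 1, ?_⟩
          rw [List.replicate_succ, List.flatten_cons, ← hk]
          conv_lhs => rw [← List.take_append_drop sub.length s]
          rw [ht]
        · rintro ⟨k, hk⟩
          match k, hk with
          | 0, hk => simp at hk; exact absurd hk hs
          | k + 1, hk =>
            refine ⟨k, ?_⟩
            rw [List.replicate_succ, List.flatten_cons] at hk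
            rw [hk, List.drop_left]
      · rw [if_pos (by simp [ht])]
        simp only [Bool.false_eq_true, false_iff]
        rintro ⟨k, hk⟩
        match k, hk with
        | 0, hk => simp at hk; exact absurd hk hs
        | k + 1, hk =>
          rw [List.replicate_succ, List.flatten_cons] at hk
          exact ht (by rw [hk, List.take_left])


theorem flat_rep_len {α : Type} (sub : List α) (k : Nat) :
    ((List.replicate k sub).flatten).length = k * sub.length := by
  induction k with
  | zero => simp
  | succ k ih => simp [List.replicate_succ, ih]; ring

theorem flat_rep_succ' {α : Type} (sub : List α) (k : Nat) :
    (List.replicate (k + 1) sub).flatten = (List.replicate k sub).flatten ++ sub := by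
  induction k with
  | zero => simp
  | succ k ih =>
    rw [List.replicate_succ, List.flatten_cons, ih, ← List.append_assoc,
      ← List.flatten_cons, ← List.replicate_succ, ih]

theorem period_bwd_aux (sub : List Char) (k : Nat) :
    ((List.replicate k sub).flatten).drop sub.length =
      ((List.replicate k sub).flatten).take (((List.replicate k sub).flatten).length - sub.length) := by
  match k with
  | 0 => simp
  | k + 1 =>
    have h1 : (List.replicate (k + 1) sub).flatten = sub ++ (List.replicate k sub).flatten := by
      rw [List.replicate_succ, List.flatten_cons]
    have h2 := flat_rep_succ' sub k
    have hl : ((List.replicate (k+1) sub).flatten).length - sub.length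
        = ((List.replicate k sub).flatten).length := by
      rw [flat_rep_len, flat_rep_len]; ring_nf; omega
    rw [hl]
    conv_lhs => rw [h1]
    conv_rhs => rw [h2]
    rw [List.drop_left, List.take_left]

theorem period_fwd : ∀ (n : Nat), ∀ (s : List Char), s.length = n → ∀ d, 1 ≤ d → d ∣ n →
    s.drop d = s.take (n - d) → ∃ k, s = (List.replicate k (s.take d)).flatten := by
  intro n
  induction n using Nat.strong_induction_on with
  | _ n ih =>
    intro s hlen d hd hdvd hper
    rcases Nat.eq_zero_or_pos n with hn0 | hnpos
    · subst hn0
      exact ⟨0, by simpa using (List.length_eq_zero_iff.mp hlen)⟩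
    · have hdn : d ≤ n := Nat.le_of_dvd hnpos hdvd
      rcases eq_or_lt_of_le hdn with heq | hlt
      · -- n = d : one block
        refine ⟨1, ?_⟩
        simp only [List.replicate_succ, List.replicate_zero, List.flatten_cons,
          List.flatten_nil, List.append_nil]
        rw [heq, ← hlen, List.take_length]
      · -- d < n, so n ≥ 2d
        have h2d : 2 * d ≤ n := by
          rcases hdvd with ⟨m, rfl⟩
          have : 2 ≤ m := by nlinarith
          nlinarith
        set t := s.drop d with htdef
        have hteq : t = s.take (n - d) := hper
        have htlen : t.length = n - d := by rw [htdef, List.length_drop, hlen]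
        have httake : t.take d = s.take d := by
          rw [hteq, List.take_take]
          congr 1; omega
        have htper : t.drop d = t.take ((n - d) - d) := by
          conv_lhs => rw [hteq]
          rw [List.drop_take]
        have hdvd' : d ∣ (n - d) := (Nat.dvd_sub hdvd dvd_rfl)
        obtain ⟨k, hk⟩ := ih (n - d) (by omega) t htlen d hd hdvd' (by rw [htper])
        refine ⟨k + 1, ?_⟩
        rw [List.replicate_succ, List.flatten_cons]
        conv_lhs => rw [← List.take_append_drop d s]
        rw [← htdef, hk, httake]

theorem period_iff (s : List Char) (d : Nat) (h1 : 1 ≤ d) (h2 : d ≤ s.length)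
    (h3 : d ∣ s.length) :
    (s.drop d = s.take (s.length - d) ↔ ∃ k, s = (List.replicate k (s.take d)).flatten) := by
  constructor
  · exact fun h => period_fwd s.length s rfl d h1 h3 h
  · rintro ⟨k, hk⟩
    have hsub : (s.take d).length = d := by
      rw [List.length_take]; omega
    conv_lhs => rw [hk]
    conv_rhs => rw [hk]
    have := period_bwd_aux (s.take d) k
    rw [hsub] at this
    rw [this]

-- A's recursive test and B's shift comparison agree (d ≥ 1, d ≤ |s|, d ∣ |s|).
theorem cond_iff (s : List Char) (d : Nat) (h1 : 1 ≤ d) (h2 : d ≤ s.length)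
    (h3 : d ∣ s.length) :
    (check_substring (s.length + 1) s (s.take d) = true ↔
      s.drop d = s.take (s.length - d)) := by
  have hs : s ≠ [] := by
    intro h; subst h; simp at h2; omega
  have hsub : s.take d ≠ [] := by
    have : (s.take d).length = d := by rw [List.length_take]; omega
    intro h; rw [h] at this; simp at this; omega
  rw [chk_iff (s.length + 1) s (s.take d) hsub (by omega)]
  exact (period_iff s d h1 h2 h3).symm

theorem loop_eq (s : List Char) (n : Int) (hn : n = (s.length : Int)) (h3 : 3 ≤ n)
    (ds : List Int) (hds : ∀ d ∈ ds, 1 ≤ d ∧ d ≤ n - 2) :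
    solLoopA s n ds = solLoopB s n (ds ++ [n - 1, n]) := by
  induction ds with
  | nil =>
    simp only [List.nil_append, solLoopA, solLoopB]
    have hm1 : ¬ (PySem.Int.mod n (n - 1) = 0 ∧
        s.drop (n-1).toNat = s.take (n - (n-1)).toNat) := by
      rintro ⟨hm, -⟩
      rw [PySem.Int.mod_eq_zero_iff_dvd] at hm
      have h1 : (n - 1) ∣ (n - (n - 1)) := dvd_sub hm dvd_rfl
      have h2 := Int.le_of_dvd (by omega) h1
      omega
    rw [if_neg hm1]
    have hm2 : PySem.Int.mod n n = 0 ∧ s.drop n.toNat = s.take (n - n).toNat := by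
      constructor
      · rw [PySem.Int.mod_eq_zero_iff_dvd]
      · have : n.toNat = s.length := by omega
        rw [this, List.drop_length]
        simp
    rw [if_pos hm2, PySem.Int.floordiv_eq_ediv_of_pos (by omega)]
    exact (Int.ediv_self (by omega)).symm
  | cons d ds ih =>
    have hd := hds d (List.mem_cons_self)
    have hds' : ∀ x ∈ ds, 1 ≤ x ∧ x ≤ n - 2 := fun x hx => hds x (List.mem_cons_of_mem d hx)
    simp only [List.cons_append, solLoopA, solLoopB]
    by_cases hm : PySem.Int.mod n d = 0
    · rw [if_neg (by simp [hm])]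
      have hdvd : d ∣ n := PySem.Int.mod_eq_zero_iff_dvd n d |>.mp hm
      have hE : d.toNat ∣ s.length := by
        have : (d.toNat : Int) ∣ (s.length : Int) := by
          rwa [Int.toNat_of_nonneg (by omega), ← hn]
        exact_mod_cast this
      have h1 : 1 ≤ d.toNat := by omega
      have h2 : d.toNat ≤ s.length := by omega
      have hcond := cond_iff s d.toNat h1 h2 hE
      have hnd : (n - d).toNat = s.length - d.toNat := by omega
      by_cases hc : check_substring (s.length + 1) s (s.take d.toNat) = true
      · rw [if_pos hc, if_pos ⟨hm, by rw [hnd]; exact hcond.mp hc⟩,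
          PySem.Int.floordiv_eq_ediv_of_pos (by omega)]
      · rw [if_neg hc, if_neg ?_]
        · exact ih hds'
        · rintro ⟨-, hsh⟩
          rw [hnd] at hsh
          exact hc (hcond.mpr hsh)
    · rw [if_pos hm, if_neg (by rintro ⟨h, -⟩; exact hm h)]
      exact ih hds'

-- ===== VERDICT (by name: the statement is the Claim_ definition above) =====
theorem mod_one_int (m : Int) : PySem.Int.mod m 1 = 0 := by
  rw [PySem.Int.mod_eq_zero_iff_dvd]; exact one_dvd m

theorem solution_spec : Claim_unchanged_solution := by
  intro str _ hD
  show solution str = solution_alt str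
  rcases hlen : str.toList with _ | ⟨a, _ | ⟨b, _ | ⟨c, t⟩⟩⟩
  · -- empty string
    simp only [solution, solution_alt, hlen]
    decide
  · -- length 1
    simp only [solution, solution_alt, hlen]
    norm_num
    rw [show PySem.List.pyRange 1 2 1 = [1] from by
        rw [show (2:Int) = 1 + 1 from rfl]; exact PySem.List.pyRange_one_singleton 1]
    simp only [solLoopA, solLoopB]
    rw [if_pos ⟨mod_one_int 1, by simp⟩]
    decide
  · -- length 2, characters differ (¬ D_solution)
    have hab : a ≠ b := by
      intro h
      exact hD (by simp [D_solution, hlen, h])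
    simp only [solution, solution_alt, hlen]
    norm_num
    rw [show PySem.List.pyRange 1 3 1 = [1, 2] from by
        rw [PySem.List.pyRange_one_cons (by omega), show (1:Int) + 1 = 2 from rfl,
          show (3:Int) = 2 + 1 from rfl, PySem.List.pyRange_one_singleton]]
    simp only [solLoopA, solLoopB]
    rw [if_neg ?_, if_pos ⟨by decide, by simp⟩]
    · decide
    · rintro ⟨-, h⟩
      simp at h
      exact hab h.symm
  · -- length ≥ 3
    simp only [solution, solution_alt, hlen]
    have hn3 : (3:Int) ≤ ((a :: b :: c :: t).length : Int) := by
      simp [List.length_cons]; omega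
    set n : Int := ((a :: b :: c :: t).length : Int) with hndef
    rw [PySem.List.pyRange_one_append 1 (n - 1) (n + 1) (by omega) (by omega),
      PySem.List.pyRange_one_cons (show n - 1 < n + 1 by omega),
      show n - 1 + 1 = n from by ring, PySem.List.pyRange_one_singleton]
    exact loop_eq _ n rfl hn3 _ (fun d hd => by
      rw [PySem.List.mem_pyRange_one] at hd
      omega)

theorem solution_changed : Claim_changed_solution := by
  unfold Claim_changed_solution; decide

theorem solution_tight : Claim_exact_solution := by
  intro str _ hD
  obtain ⟨h2, hget⟩ := hD
  rcases hlen : str.toList with _ | ⟨a, _ | ⟨b, _ | ⟨c, t⟩⟩⟩ <;>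
    rw [hlen] at h2 <;> simp at h2
  have hab : a = b := by
    rw [hlen] at hget
    simpa using hget
  subst hab
  simp only [solution, solution_alt, hlen]
  norm_num
  rw [show PySem.List.pyRange 1 3 1 = [1, 2] from by
      rw [PySem.List.pyRange_one_cons (by omega), show (1:Int) + 1 = 2 from rfl,
        show (3:Int) = 2 + 1 from rfl, PySem.List.pyRange_one_singleton]]
  simp only [solLoopA, solLoopB]
  rw [if_pos ⟨by decide, by simp⟩]
  decide
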